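-- pv_equiv track=rewrite | github.com/AndreiSkrypko/mental_final_new | test_number_generation.py | check_intermediate_sums
-- ===== SOURCE A (Python) =====
-- def check_intermediate_sums(numbers):
--     """Проверяем, что все промежуточные суммы неотрицательные"""
--     current_sum = 0
--     intermediate_sums = []
--
--     for i, num in enumerate(numbers):
--         current_sum += num
--         intermediate_sums.append(current_sum)
--         if current_sum < 0:
--             return False, i, intermediate_sums
--
--     return True, -1, intermediate_sums
-- ===== SOURCE B (Python) =====
-- from itertools import accumulate
--
--
-- def check_intermediate_sums(numbers):
--     """Проверяем, что все промежуточные суммы неотрицательные"""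
--     prefixes = list(accumulate(numbers))
--     i = next((i for i, s in enumerate(prefixes) if s < 0), -1)
--     if i >= 0:
--         return False, i, prefixes[:i + 1]
--     return True, -1, prefixes
-- ===== Notes on version B (the rewrite author's own statement) =====
-- stated objective: idiomatic
-- what changed: A's single fused loop that accumulates, appends and checks with an early return is replaced by itertools.accumulate building the whole prefix-sum table, then a separate search pass (next/enumerate) for the first negative prefix, with a slice reproducing the truncated list.
import Mathlib
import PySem

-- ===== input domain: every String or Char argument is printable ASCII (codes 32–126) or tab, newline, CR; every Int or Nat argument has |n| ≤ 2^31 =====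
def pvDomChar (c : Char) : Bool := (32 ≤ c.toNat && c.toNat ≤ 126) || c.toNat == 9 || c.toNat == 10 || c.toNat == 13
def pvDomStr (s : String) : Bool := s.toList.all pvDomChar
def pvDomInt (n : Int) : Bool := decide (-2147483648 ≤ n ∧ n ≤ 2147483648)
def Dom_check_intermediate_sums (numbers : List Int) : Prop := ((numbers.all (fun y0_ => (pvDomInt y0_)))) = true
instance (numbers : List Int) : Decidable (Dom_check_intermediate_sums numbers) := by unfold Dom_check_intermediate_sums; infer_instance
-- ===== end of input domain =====

-- B builds the full prefix-sum table with accumulate, then searches it in a second pass (idiomatic decomposition; same return value).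
-- ===== PORT A =====
-- A's for-loop with early return: recursion over numbers carrying (i, current_sum, intermediate_sums).
def pvGoA (numbers : List Int) (i : Int) (current_sum : Int) (intermediate_sums : List Int) : Bool × Int × List Int :=
  match numbers with
  | [] => (true, -1, intermediate_sums)
  | num :: rest =>
    let cs := current_sum + num
    let acc := intermediate_sums ++ [cs]
    if cs < 0 then (false, i, acc)
    else pvGoA rest (i + 1) cs acc

def check_intermediate_sums (numbers : List Int) : Bool × Int × List Int :=
  pvGoA numbers 0 0 []

-- ===== PORT B =====
-- itertools.accumulate(numbers) starting from running sum s
def pvAccumulate (numbers : List Int) (s : Int) : List Int :=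
  match numbers with
  | [] => []
  | x :: xs => (s + x) :: pvAccumulate xs (s + x)

-- next((i for i, s in enumerate(prefixes) if s < 0), -1) : first index with a negative entry
def pvFirstNegIdx (prefixes : List Int) : Option Nat :=
  match prefixes with
  | [] => none
  | x :: xs => if x < 0 then some 0 else (pvFirstNegIdx xs).map (· + 1)

def check_intermediate_sums_alt (numbers : List Int) : Bool × Int × List Int :=
  let prefixes := pvAccumulate numbers 0
  match pvFirstNegIdx prefixes with
  | some i => (false, (i : Int), prefixes.take (i + 1))
  | none => (true, -1, prefixes)

-- ===== PRECONDITION & SPEC =====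
def Spec_check_intermediate_sums (numbers : List Int) (out : Bool × Int × List Int) : Prop := out = check_intermediate_sums_alt numbers
instance (numbers : List Int) (out : Bool × Int × List Int) : Decidable (Spec_check_intermediate_sums numbers out) := by unfold Spec_check_intermediate_sums; infer_instance

-- ===== CLAIM (what is proved, stated in full; the proofs are below) =====
def Claim_equal_check_intermediate_sums : Prop := ∀ (numbers : List Int), Dom_check_intermediate_sums numbers → Spec_check_intermediate_sums numbers (check_intermediate_sums numbers)

-- ===== LEMMAS AND PROOFS =====

-- ===== VERDICT (by name: the statement is the Claim_ definition above) =====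
lemma pvGoA_eq (numbers : List Int) : ∀ (i s : Int) (acc : List Int),
    pvGoA numbers i s acc =
      match pvFirstNegIdx (pvAccumulate numbers s) with
      | some j => (false, i + (j : Int), acc ++ (pvAccumulate numbers s).take (j + 1))
      | none => (true, -1, acc ++ pvAccumulate numbers s) := by
  induction numbers with
  | nil => intro i s acc; simp [pvGoA, pvAccumulate, pvFirstNegIdx]
  | cons x xs ih =>
    intro i s acc
    by_cases h : s + x < 0
    · simp [pvGoA, pvAccumulate, pvFirstNegIdx, h]
    · rw [show pvGoA (x :: xs) i s acc = pvGoA xs (i + 1) (s + x) (acc ++ [s + x]) by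
        simp [pvGoA, h]]
      rw [ih]
      simp only [pvAccumulate, pvFirstNegIdx, if_neg h]
      cases hj : pvFirstNegIdx (pvAccumulate xs (s + x)) with
      | none => simp
      | some j =>
        simp only [Option.map_some, List.take_succ_cons, List.append_assoc,
          List.cons_append, List.nil_append, Prod.mk.injEq, true_and]
        refine ⟨by omega, ?_⟩
        trivial

theorem check_intermediate_sums_spec : Claim_equal_check_intermediate_sums := by
  intro numbers _
  unfold Spec_check_intermediate_sums check_intermediate_sums check_intermediate_sums_alt
  rw [pvGoA_eq]
  simp only []
  cases h : pvFirstNegIdx (pvAccumulate numbers 0) <;> simp
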